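-- pv_equiv track=rewrite | github.com/h-mayorquin/firing_rate_sequences | analysis.py | create_sequence_chain
-- ===== SOURCE A (Python) =====
-- def create_sequence_chain(number_of_sequences, half_width, units_to_overload):
--     chain = []
--     number = 0
--     for _ in range(number_of_sequences):
--
--         sequence = []
--
--         # The first half
--         i = 0
--         while i < half_width:
--             if number in units_to_overload:
--                 number += 1
--
--             else:
--                 sequence.append(number)
--                 number += 1
--                 i += 1
--
--         # The overload units in the middle
--         sequence += units_to_overload
--
--         # The second half
--         i = 0
--         while i < half_width:
--             if number in units_to_overload:
--                 number += 1
--             else: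
--                 sequence.append(number)
--                 number += 1
--                 i += 1
--
--         chain.append(sequence)
--
--     return chain
-- ===== SOURCE B (Python) =====
-- def create_sequence_chain(number_of_sequences, half_width, units_to_overload):
--     w = max(half_width, 0)
--     need = 2 * w * max(number_of_sequences, 0)
--     # Build the needed free (non-overload) numbers from the gaps between the
--     # sorted distinct overload values, instead of testing membership per integer.
--     free = []
--     start = 0
--     for u in sorted(set(units_to_overload)):
--         if u >= start:
--             if len(free) >= need:
--                 break
--             free.extend(range(start, min(u, start + need - len(free))))
--             start = u + 1
--     free.extend(range(start, start + need - len(free)))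
--     mid = list(units_to_overload)
--     return [free[2*w*j : 2*w*j + w] + mid + free[2*w*j + w : 2*w*(j+1)]
--             for j in range(number_of_sequences)]
-- ===== Notes on version B (the rewrite author's own statement) =====
-- stated objective: faster
-- what changed: Instead of walking the integers one by one with a membership test per step, B sorts the distinct overload values once and emits the free numbers as whole gap ranges between consecutive sorted overload values, then cuts the precomputed free list into per-sequence slices around the inserted overload block.
import Mathlib
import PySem

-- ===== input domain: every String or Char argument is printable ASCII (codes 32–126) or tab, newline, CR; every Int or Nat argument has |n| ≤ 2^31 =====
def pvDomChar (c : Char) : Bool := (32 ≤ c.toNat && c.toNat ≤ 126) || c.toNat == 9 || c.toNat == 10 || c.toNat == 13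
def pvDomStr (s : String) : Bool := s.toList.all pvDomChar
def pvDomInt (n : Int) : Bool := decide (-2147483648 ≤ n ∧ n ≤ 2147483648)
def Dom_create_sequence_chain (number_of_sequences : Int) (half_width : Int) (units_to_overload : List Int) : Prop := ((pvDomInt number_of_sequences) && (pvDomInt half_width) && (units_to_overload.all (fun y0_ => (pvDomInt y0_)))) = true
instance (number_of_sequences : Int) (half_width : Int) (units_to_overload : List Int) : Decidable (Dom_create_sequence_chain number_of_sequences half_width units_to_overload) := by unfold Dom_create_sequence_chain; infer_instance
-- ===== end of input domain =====

-- B replaces A's per-integer membership-testing walk by sorting the distinct overload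
-- values once, emitting the free numbers as whole gap ranges, and slicing them per sequence.

-- termination helpers (cited by the ports'/helpers' decreasing_by)
theorem pvCountLtLe (units : List Int) (n : Int) :
    units.countP (fun u => decide (n < u)) ≤ units.countP (fun u => decide (n ≤ u)) := by
  induction units with
  | nil => simp
  | cons a t ih =>
    simp only [List.countP_cons]
    by_cases h1 : (n : Int) < a <;> by_cases h2 : (n : Int) ≤ a <;> simp [h1, h2] <;> omega

theorem pvCountLtLt (units : List Int) (n : Int) (h : n ∈ units) :
    units.countP (fun u => decide (n < u)) < units.countP (fun u => decide (n ≤ u)) := by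
  induction units with
  | nil => simp at h
  | cons a t ih =>
    simp only [List.countP_cons]
    rcases List.mem_cons.mp h with rfl | h'
    · have := pvCountLtLe t n
      simp
      omega
    · have := ih h'
      by_cases h1 : (n : Int) < a <;> by_cases h2 : (n : Int) ≤ a <;>
        simp [h1, h2] <;> omega

theorem pvCountSucc (units : List Int) (n : Int) :
    units.countP (fun u => decide (n + 1 ≤ u)) = units.countP (fun u => decide (n < u)) := by
  have : (fun u : Int => decide (n + 1 ≤ u)) = (fun u : Int => decide (n < u)) := by
    funext u; rcases lt_or_ge n u with h | h <;> simp [h, not_lt.mp]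
  rw [this]

-- ===== PORT A =====
-- the inline while loop:  while i < half_width: skip members of units, append others
def loopA (hw : Int) (units : List Int) (i number : Int) (seq : List Int) : List Int × Int :=
  if _hlt : i < hw then
    if hmem : number ∈ units then
      loopA hw units i (number + 1) seq
    else
      loopA hw units (i + 1) (number + 1) (seq ++ [number])
  else (seq, number)
termination_by (hw - i).toNat + units.countP (fun u => decide (number ≤ u))
decreasing_by
  · have h1 := pvCountLtLt units number hmem
    have h2 := pvCountSucc units number
    omega
  · have h1 := pvCountLtLe units number
    have h2 := pvCountSucc units number
    have : (hw - (i + 1)).toNat < (hw - i).toNat := by omega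
    omega

-- for _ in range(number_of_sequences): two while loops, middle insertion, append to chain
def chainA (hw : Int) (units : List Int) (k : Nat) (number : Int) (chain : List (List Int)) : List (List Int) :=
  match k with
  | 0 => chain
  | k + 1 =>
    let r1 := loopA hw units 0 number []
    let r2 := loopA hw units 0 r1.2 (r1.1 ++ units)
    chainA hw units k r2.2 (chain ++ [r2.1])

def create_sequence_chain (number_of_sequences : Int) (half_width : Int) (units_to_overload : List Int) : List (List Int) :=
  chainA half_width units_to_overload number_of_sequences.toNat 0 []

-- ===== PORT B =====
-- list(range(a, b)) for Int bounds (empty when b ≤ a)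
def intRange (a b : Int) : List Int :=
  (List.range (b - a).toNat).map (fun i => a + Int.ofNat i)

-- the for-loop over sorted(set(units)): emit the free gap before each overload value,
-- clipped to the number of free values still needed; break once enough are collected
def freeLoop (need : Nat) : List Int → Int → List Int → List Int × Int
  | [], start, acc => (acc, start)
  | u :: rest, start, acc =>
    if start ≤ u then
      if need ≤ acc.length then (acc, start)
      else freeLoop need rest (u + 1)
        (acc ++ intRange start (min u (start + ((need : Int) - acc.length))))
    else freeLoop need rest start acc

def create_sequence_chain_alt (number_of_sequences : Int) (half_width : Int) (units_to_overload : List Int) : List (List Int) :=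
  let w : Int := max half_width 0
  let need : Nat := (2 * w * max number_of_sequences 0).toNat
  let p := freeLoop need (PySem.List.sorted (PySem.Set.ofList units_to_overload) (fun x => x) false) 0 []
  let free := p.1 ++ intRange p.2 (p.2 + ((need : Int) - p.1.length))
  (PySem.List.pyRange 0 number_of_sequences 1).map (fun j =>
    PySem.List.slice free (some (2 * w * j)) (some (2 * w * j + w)) ++ units_to_overload ++
    PySem.List.slice free (some (2 * w * j + w)) (some (2 * w * (j + 1))))

-- ===== PRECONDITION & SPEC =====
def Spec_create_sequence_chain (number_of_sequences : Int) (half_width : Int) (units_to_overload : List Int) (out : List (List Int)) : Prop := out = create_sequence_chain_alt number_of_sequences half_width units_to_overload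
instance (number_of_sequences : Int) (half_width : Int) (units_to_overload : List Int) (out : List (List Int)) : Decidable (Spec_create_sequence_chain number_of_sequences half_width units_to_overload out) := by unfold Spec_create_sequence_chain; infer_instance

-- ===== CLAIM =====
def Claim_equal_create_sequence_chain : Prop := ∀ (number_of_sequences : Int) (half_width : Int) (units_to_overload : List Int), Dom_create_sequence_chain number_of_sequences half_width units_to_overload → Spec_create_sequence_chain number_of_sequences half_width units_to_overload (create_sequence_chain number_of_sequences half_width units_to_overload)

-- ===== LEMMAS AND PROOFS =====

-- canonical skip-walk stream: the next k free integers from n, with the final counter state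
def nextFree (units : List Int) (n : Int) : Int :=
  if hmem : n ∈ units then nextFree units (n + 1) else n
termination_by units.countP (fun u => decide (n ≤ u))
decreasing_by
  have h1 := pvCountLtLt units n hmem
  have h2 := pvCountSucc units n
  omega

def takeGen (units : List Int) (k : Nat) (n : Int) : List Int × Int :=
  match k with
  | 0 => ([], n)
  | k + 1 =>
    let m := nextFree units n
    let r := takeGen units k (m + 1)
    (m :: r.1, r.2)

-- A-side generator-chunk recursion (proof intermediate)
def genChain (hw : Int) (units : List Int) (k : Nat) (n : Int) : List (List Int) :=
  match k with
  | 0 => []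
  | k + 1 =>
    let r1 := takeGen units hw.toNat n
    let r2 := takeGen units hw.toNat r1.2
    (r1.1 ++ units ++ r2.1) :: genChain hw units k r2.2

-- B-side slicing recursion (proof intermediate)
def sliceChain (w : Nat) (U : List Int) : Nat → List Int → List (List Int)
  | 0, _ => []
  | k + 1, F => (F.take w ++ U ++ (F.drop w).take w) :: sliceChain w U k (F.drop (2 * w))

theorem takeGen_skip (units : List Int) (k : Nat) (n : Int) (h : n ∈ units) :
    takeGen units (k + 1) n = takeGen units (k + 1) (n + 1) := by
  have : nextFree units n = nextFree units (n + 1) := by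
    rw [nextFree]; simp [h]
  simp [takeGen, this]

theorem loopA_eq_takeGen (hw : Int) (units : List Int) (i number : Int) (seq : List Int) :
    loopA hw units i number seq =
      (seq ++ (takeGen units (hw - i).toNat number).1, (takeGen units (hw - i).toNat number).2) := by
  induction i, number, seq using loopA.induct hw units with
  | case1 i number seq hlt hmem ih =>
    rw [loopA]
    simp only [hlt, hmem, dif_pos]
    obtain ⟨m, hm⟩ : ∃ m, (hw - i).toNat = m + 1 := ⟨(hw - i).toNat - 1, by omega⟩
    rw [ih, hm, ← takeGen_skip units m number hmem]
  | case2 i number seq hlt hmem ih =>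
    rw [loopA]
    simp only [hlt, hmem, dif_pos]
    obtain ⟨m, hm⟩ : ∃ m, (hw - i).toNat = m + 1 ∧ (hw - (i + 1)).toNat = m :=
      ⟨(hw - i).toNat - 1, by omega, by omega⟩
    have hnf : nextFree units number = number := by rw [nextFree]; simp [hmem]
    rw [ih, hm.1, hm.2]
    simp [takeGen, hnf]
  | case3 i number seq hlt =>
    rw [loopA]
    have : (hw - i).toNat = 0 := by omega
    simp [hlt, this, takeGen]

theorem chainA_eq_genChain (hw : Int) (units : List Int) (k : Nat) (number : Int) (chain : List (List Int)) :
    chainA hw units k number chain = chain ++ genChain hw units k number := by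
  induction k generalizing number chain with
  | zero => simp [chainA, genChain]
  | succ k ih =>
    rw [chainA, genChain]
    simp only [loopA_eq_takeGen]
    rw [ih]
    simp [List.append_assoc]

theorem takeGen_length (units : List Int) (k : Nat) (n : Int) :
    (takeGen units k n).1.length = k := by
  induction k generalizing n with
  | zero => simp [takeGen]
  | succ k ih => simp [takeGen, ih]

theorem takeGen_split (units : List Int) (a b : Nat) (n : Int) :
    takeGen units (a + b) n =
      ((takeGen units a n).1 ++ (takeGen units b (takeGen units a n).2).1,
       (takeGen units b (takeGen units a n).2).2) := by
  induction a generalizing n with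
  | zero => simp [takeGen]
  | succ a ih =>
    have : a + 1 + b = (a + b) + 1 := by omega
    rw [this]
    simp [takeGen, ih]

theorem intRange_cons (a b : Int) (h : a < b) :
    intRange a b = a :: intRange (a + 1) b := by
  unfold intRange
  have hk : (b - a).toNat = (b - (a + 1)).toNat + 1 := by omega
  rw [hk, List.range_succ_eq_map]
  simp [List.map_map, Function.comp]
  intro i _
  ring

theorem intRange_empty (a b : Int) (h : b ≤ a) : intRange a b = [] := by
  unfold intRange
  have : (b - a).toNat = 0 := by omega
  simp [this]

theorem intRange_length (a b : Int) : (intRange a b).length = (b - a).toNat := by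
  simp [intRange]

theorem takeGen_consec (units : List Int) (m : Nat) (s : Int)
    (hfree : ∀ n : Int, s ≤ n → n < s + (m : Int) → n ∉ units) :
    takeGen units m s = (intRange s (s + (m : Int)), s + (m : Int)) := by
  induction m generalizing s with
  | zero =>
    simp [takeGen, intRange_empty]
  | succ m ih =>
    have hs : s ∉ units := hfree s le_rfl (by push_cast; omega)
    have hnf : nextFree units s = s := by rw [nextFree]; simp [hs]
    have hih := ih (s + 1) (fun n h1 h2 => hfree n (by omega) (by push_cast at h2 ⊢; omega))
    have hcast : s + 1 + (m : Int) = s + ((m + 1 : Nat) : Int) := by push_cast; ring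
    rw [takeGen]
    simp only [hnf, hih]
    rw [intRange_cons s (s + ((m + 1 : Nat) : Int)) (by push_cast; omega), hcast]

theorem freeLoop_eq (units : List Int) (need : Nat) (L : List Int) (s : Int) (acc : List Int)
    (hL : L.Pairwise (· < ·))
    (hiff : ∀ n : Int, s ≤ n → (n ∈ units ↔ n ∈ L))
    (hlen : acc.length ≤ need) :
    (freeLoop need L s acc).1 ++
      intRange (freeLoop need L s acc).2
        ((freeLoop need L s acc).2 + ((need : Int) - (freeLoop need L s acc).1.length))
      = acc ++ (takeGen units (need - acc.length) s).1 := by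
  induction L generalizing s acc with
  | nil =>
    simp only [freeLoop]
    have hm : ((need : Int) - acc.length) = ((need - acc.length : Nat) : Int) := by omega
    rw [hm, takeGen_consec units (need - acc.length) s
      (fun n h1 _ hn => by simpa using (hiff n h1).mp hn)]
  | cons u rest ih =>
    obtain ⟨hgt, htail⟩ := List.pairwise_cons.mp hL
    by_cases hsu : s ≤ u
    · by_cases hfull : need ≤ acc.length
      · simp only [freeLoop, hsu, hfull, if_pos]
        have hacc : acc.length = need := le_antisymm hlen hfull
        have h0 : need - acc.length = 0 := by omega
        have h0' : ((need : Int) - acc.length) = 0 := by omega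
        simp [h0, h0', takeGen, intRange_empty]
      · simp only [freeLoop, hsu, hfull, if_pos, if_false]
        have hltn : acc.length < need := by omega
        have hiff' : ∀ n : Int, u + 1 ≤ n → (n ∈ units ↔ n ∈ rest) := by
          intro n hn
          have h := hiff n (by omega)
          rw [h, List.mem_cons]
          refine ⟨fun hcase => ?_, Or.inr⟩
          rcases hcase with rfl | h'
          · omega
          · exact h'
        by_cases hclip : ((need : Int) - acc.length) ≤ u - s
        · -- the whole remaining need fits before u
          have hmin : min u (s + ((need : Int) - acc.length)) = s + ((need : Int) - acc.length) :=
            min_eq_right (by omega)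
          rw [hmin]
          set m : Nat := need - acc.length with hmdef
          have hmi : ((need : Int) - acc.length) = (m : Int) := by omega
          rw [hmi]
          have hlen' : (acc ++ intRange s (s + (m : Int))).length = need := by
            simp [intRange_length]; omega
          rw [ih (u + 1) (acc ++ intRange s (s + (m : Int))) htail (fun n hn => hiff' n (by omega)) (le_of_eq hlen')]
          have hz : need - (acc ++ intRange s (s + (m : Int))).length = 0 := by omega
          rw [hz]
          have hcons : takeGen units m s = (intRange s (s + (m : Int)), s + (m : Int)) := by
            apply takeGen_consec
            intro n h1 h2 hn
            have := (hiff n h1).mp hn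
            rw [List.mem_cons] at this
            rcases this with rfl | h'
            · omega
            · exact absurd (hgt n h') (by omega)
          simp [takeGen, hcons]
        · -- only the gap [s, u) fits; u itself is an overload value, skip it
          have hmin : min u (s + ((need : Int) - acc.length)) = u := min_eq_left (by omega)
          rw [hmin]
          set g : Nat := (u - s).toNat with hgdef
          set m : Nat := need - acc.length with hmdef
          have hgm : g < m := by omega
          have hlen' : (acc ++ intRange s u).length = acc.length + g := by
            simp [intRange_length]; omega
          rw [ih (u + 1) (acc ++ intRange s u) htail (fun n hn => hiff' n (by omega)) (by omega)]
          have hrem : need - (acc ++ intRange s u).length = m - g := by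
            rw [hlen']; omega
          rw [hrem]
          have hsplit := takeGen_split units g (m - g) s
          have hcons : takeGen units g s = (intRange s u, u) := by
            have := takeGen_consec units g s (by
              intro n h1 h2 hn
              have := (hiff n h1).mp hn
              rw [List.mem_cons] at this
              rcases this with rfl | h'
              · omega
              · exact absurd (hgt n h') (by omega))
            have hu : s + (g : Int) = u := by omega
            rw [this, hu]
          have hmem : u ∈ units := (hiff u hsu).mpr List.mem_cons_self
          obtain ⟨k, hk⟩ : ∃ k, m - g = k + 1 := ⟨m - g - 1, by omega⟩
          have hskip := takeGen_skip units k u hmem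
          have hgoal : takeGen units m s =
              (intRange s u ++ (takeGen units (m - g) (u + 1)).1,
               (takeGen units (m - g) (u + 1)).2) := by
            have hmg : g + (m - g) = m := by omega
            rw [hmg] at hsplit
            rw [hsplit, hcons, hk, hskip]
          rw [hgoal]
          simp
    · simp only [freeLoop, hsu]
      have hiff' : ∀ n : Int, s ≤ n → (n ∈ units ↔ n ∈ rest) := by
        intro n hn
        have h := hiff n hn
        rw [h, List.mem_cons]
        refine ⟨fun hcase => ?_, Or.inr⟩
        rcases hcase with rfl | h'
        · omega
        · exact h'
      exact ih s acc htail hiff' hlen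

theorem genChain_eq_sliceChain (hw : Int) (units : List Int) (k : Nat) (n : Int) :
    genChain hw units k n = sliceChain hw.toNat units k ((takeGen units (2 * hw.toNat * k) n).1) := by
  induction k generalizing n with
  | zero => simp [genChain, sliceChain]
  | succ k ih =>
    rw [genChain]
    have h1 : 2 * hw.toNat * (k + 1) = hw.toNat + (hw.toNat + 2 * hw.toNat * k) := by ring
    rw [h1, takeGen_split units hw.toNat (hw.toNat + 2 * hw.toNat * k) n,
        takeGen_split units hw.toNat (2 * hw.toNat * k) _]
    rw [sliceChain]
    have lA := takeGen_length units hw.toNat n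
    have lB := takeGen_length units hw.toNat (takeGen units hw.toNat n).2
    congr 1
    · rw [List.take_append_of_le_length (by omega), List.take_of_length_le (by omega),
          List.drop_append_of_le_length (by omega), List.drop_of_length_le (by omega)]
      simp only [List.nil_append]
      rw [List.take_append_of_le_length (by omega), List.take_of_length_le (by omega)]
    · rw [ih]
      congr 1
      rw [← List.append_assoc]
      have h2 : 2 * hw.toNat = ((takeGen units hw.toNat n).1 ++
          (takeGen units hw.toNat (takeGen units hw.toNat n).2).1).length := by
        simp [List.length_append]; omega
      rw [h2, List.drop_left]

theorem map_range_slice (w : Nat) (U : List Int) (k : Nat) (F : List Int) :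
    (List.range k).map (fun j => (F.drop (2 * w * j)).take w ++ U ++ (F.drop (2 * w * j + w)).take w)
      = sliceChain w U k F := by
  induction k generalizing F with
  | zero => simp [sliceChain]
  | succ k ih =>
    rw [List.range_succ_eq_map, List.map_cons, List.map_map, sliceChain]
    congr 1
    · simp
    · rw [← ih (F.drop (2 * w))]
      apply List.map_congr_left
      intro j _
      simp only [Function.comp_apply, Nat.succ_eq_add_one]
      have e2 : 2 * w * (j + 1) + w = (2 * w * j + w) + 2 * w := by ring
      have e1 : 2 * w * (j + 1) = 2 * w * j + 2 * w := by ring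
      rw [e2, e1]
      simp [List.drop_drop, Nat.add_comm]

-- ===== VERDICT =====
theorem slice_nat (F : List Int) (a b : Nat) :
    PySem.List.slice F (some ((a : Nat) : Int)) (some ((b : Nat) : Int)) = (F.drop a).take (b - a) := by
  rw [PySem.List.slice_toNat F (by positivity) (by positivity)]
  simp

theorem create_sequence_chain_spec : Claim_equal_create_sequence_chain := by
  intro n hw units _
  show create_sequence_chain n hw units = create_sequence_chain_alt n hw units
  unfold create_sequence_chain create_sequence_chain_alt
  simp only
  have hmax : max hw 0 = ((hw.toNat : Nat) : Int) := by omega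
  have hmaxn : max n 0 = ((n.toNat : Nat) : Int) := by omega
  -- the precomputed free list is exactly the first `need` values of the skip-walk stream
  have hF := freeLoop_eq units (2 * max hw 0 * max n 0).toNat
      (PySem.List.sorted (PySem.Set.ofList units) (fun x => x) false) 0 []
      (PySem.List.sorted_ofList_pairwise_lt units)
      (fun m _ => by
        rw [PySem.List.mem_sorted]
        exact (PySem.Set.mem_ofList units m).symm)
      (by simp)
  simp only [List.length_nil, Nat.sub_zero, List.nil_append] at hF
  rw [hF]
  -- A side: chunked skip-walk stream
  rw [chainA_eq_genChain, List.nil_append, genChain_eq_sliceChain hw units n.toNat 0]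
  -- B side: slices of the free list
  rw [PySem.List.pyRange_one, hmax, List.map_map]
  have hsub : (n - 0).toNat = n.toNat := by omega
  rw [hsub]
  rw [List.map_congr_left (fun (j : Nat) (_ : j ∈ List.range n.toNat) => by
    simp only [Function.comp_apply, zero_add]
    have c1 : 2 * ((hw.toNat : Nat) : Int) * ((j : Nat) : Int)
        = ((2 * hw.toNat * j : Nat) : Int) := by push_cast; ring
    have c2 : 2 * ((hw.toNat : Nat) : Int) * ((j : Nat) : Int) + ((hw.toNat : Nat) : Int)
        = ((2 * hw.toNat * j + hw.toNat : Nat) : Int) := by push_cast; ring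
    have c3 : 2 * ((hw.toNat : Nat) : Int) * (((j : Nat) : Int) + 1)
        = ((2 * hw.toNat * j + hw.toNat + hw.toNat : Nat) : Int) := by push_cast; ring
    have t1 : 2 * hw.toNat * j + hw.toNat - 2 * hw.toNat * j = hw.toNat := by omega
    have t2 : 2 * hw.toNat * j + hw.toNat + hw.toNat - (2 * hw.toNat * j + hw.toNat) = hw.toNat := by omega
    rw [c3, c2, c1, slice_nat, slice_nat, t1, t2])]
  rw [map_range_slice hw.toNat units n.toNat]
  rw [hmaxn]
  have h : (2 * ((hw.toNat : Nat) : Int) * ((n.toNat : Nat) : Int)).toNat = 2 * hw.toNat * n.toNat := by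
    have h2 : 2 * ((hw.toNat : Nat) : Int) * ((n.toNat : Nat) : Int)
        = ((2 * hw.toNat * n.toNat : Nat) : Int) := by push_cast; ring
    rw [h2, Int.toNat_natCast]
  rw [h]
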